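-- pv_equiv track=rewrite | github.com/AnneJoJo/Algorithm | Algorithm2019/legacy/Microsoft/OA.py | math
-- ===== SOURCE A (Python) =====
-- def math(arr):
--     prod = 1
--     for n in arr:
--         prod *= n
--
--     if(prod>0):
--         return 1
--     elif(prod<0):
--         return -1
--     else:
--         return 0
-- ===== SOURCE B (Python) =====
-- def math(arr):
--     neg = 0
--     for n in arr:
--         if n == 0:
--             return 0
--         if n < 0:
--             neg += 1
--     return -1 if neg % 2 == 1 else 1
-- ===== Notes on version B (the rewrite author's own statement) =====
-- stated objective: faster
-- what changed: B never multiplies: it scans once, returning 0 on the first zero and otherwise the parity of the count of negative elements, instead of A's bignum running product.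
import Mathlib
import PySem

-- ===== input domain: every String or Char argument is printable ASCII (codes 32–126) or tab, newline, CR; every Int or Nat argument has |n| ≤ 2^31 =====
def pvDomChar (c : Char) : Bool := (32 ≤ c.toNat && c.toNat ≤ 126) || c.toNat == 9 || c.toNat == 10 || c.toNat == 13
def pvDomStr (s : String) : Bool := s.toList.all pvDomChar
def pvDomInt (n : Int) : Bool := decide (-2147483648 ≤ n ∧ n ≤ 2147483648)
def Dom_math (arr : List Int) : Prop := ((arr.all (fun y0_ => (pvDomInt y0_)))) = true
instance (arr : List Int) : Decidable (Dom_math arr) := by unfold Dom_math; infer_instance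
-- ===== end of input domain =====

-- B replaces A's bignum running product by a single scan counting negatives (zero short-circuits); faster asymptotically.


-- ===== PORT A =====
-- A: prod = 1; for n in arr: prod *= n; then return sign of prod.
def math (arr : List Int) : Int :=
  let prod := arr.foldl (fun p n => p * n) 1
  if prod > 0 then 1 else if prod < 0 then -1 else 0

-- ===== PORT B =====
-- B: one pass; return 0 at the first zero, else count negatives and use parity.
def mathAltGo : List Int → Int → Int
  | [], neg => if neg % 2 == 1 then -1 else 1
  | n :: t, neg =>
      if n = 0 then 0
      else mathAltGo t (if n < 0 then neg + 1 else neg)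

def math_alt (arr : List Int) : Int := mathAltGo arr 0

-- ===== PRECONDITION & SPEC =====
def Spec_math (arr : List Int) (out : Int) : Prop := out = math_alt arr
instance (arr : List Int) (out : Int) : Decidable (Spec_math arr out) := by unfold Spec_math; infer_instance

-- ===== CLAIM (what is proved, stated in full; the proofs are below) =====
def Claim_equal_math : Prop := ∀ (arr : List Int), Dom_math arr → Spec_math arr (math arr)

-- ===== LEMMAS AND PROOFS =====

theorem foldl_mul_zero (arr : List Int) : arr.foldl (fun p n => p * n) 0 = 0 := by
  induction arr with
  | nil => rfl
  | cons h t ih => simpa using ih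

-- Invariant: acc's sign matches neg's parity; then sign of foldl product = mathAltGo.
theorem go_inv (arr : List Int) : ∀ (acc neg : Int),
    ((0 < acc ∧ neg % 2 = 0) ∨ (acc < 0 ∧ neg % 2 = 1)) →
    (let prod := arr.foldl (fun p n => p * n) acc
     if prod > 0 then (1 : Int) else if prod < 0 then -1 else 0) = mathAltGo arr neg := by
  induction arr with
  | nil =>
      intro acc neg hinv
      simp only [List.foldl, mathAltGo]
      rcases hinv with ⟨hpos, hpar⟩ | ⟨hneg, hpar⟩
      · rw [if_pos hpos]
        have : ¬ (neg % 2 == 1) = true := by simp [hpar]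
        simp [this]
      · rw [if_neg (by omega), if_pos hneg]
        simp [hpar]
  | cons n t ih =>
      intro acc neg hinv
      simp only [List.foldl, mathAltGo]
      by_cases hz : n = 0
      · subst hz
        simp only [mul_zero]
        rw [foldl_mul_zero]
        simp
      · rw [if_neg hz]
        by_cases hn : n < 0
        · rw [if_pos hn]
          apply ih
          rcases hinv with ⟨hpos, hpar⟩ | ⟨hneg2, hpar⟩
          · right; constructor
            · exact mul_neg_of_pos_of_neg hpos hn
            · omega
          · left; constructor
            · exact mul_pos_of_neg_of_neg hneg2 hn
            · omega
        · rw [if_neg hn]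
          have hp : 0 < n := lt_of_le_of_ne (not_lt.mp hn) (Ne.symm hz)
          apply ih
          rcases hinv with ⟨hpos, hpar⟩ | ⟨hneg2, hpar⟩
          · left; exact ⟨mul_pos hpos hp, hpar⟩
          · right; exact ⟨mul_neg_of_neg_of_pos hneg2 hp, hpar⟩

-- ===== VERDICT (by name: the statement is the Claim_ definition above) =====
theorem math_spec : Claim_equal_math := by
  intro arr _
  show math arr = math_alt arr
  unfold math math_alt
  exact go_inv arr 1 0 (Or.inl ⟨one_pos, rfl⟩)
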